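-- pv_equiv track=rewrite | github.com/yangfcm/algorithm-python | algo/greedy/luck_balance.py | solution
-- ===== SOURCE A (Python) =====
-- def solution(contests, k):
--   contests.sort(key=lambda x: x[0]) # Sort the contests list by point(the first element in each list element)
--   reverseSorted = contests[::-1]
--   maxLuck = 0
--   importantLost = 0
--
--   for c in reverseSorted:
--     if c[1] == 0: # If it's an unimportant contest (c[1] == 0), then you can lose it as many as you want
--       maxLuck += c[0]
--     else: # If it's an important contest...
--       if importantLost < k: # You can lose it
--         maxLuck += c[0]
--         importantLost += 1
--       else: # Now, you've already lost k important contests, you can't lose it any more.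
--         maxLuck -= c[0]
--
--   return maxLuck
-- ===== SOURCE B (Python) =====
-- def topsum(vals, t):
--     # sum of the t largest values of vals, 0 <= t <= len(vals):
--     # quickselect-style three-way partitioning around a middle pivot,
--     # keeping only the side containing the selection boundary. No sorting.
--     acc = 0
--     while True:
--         if t == 0:
--             return acc
--         if t == len(vals):
--             return acc + sum(vals)
--         pivot = vals[len(vals) // 2]
--         hi = [v for v in vals if v > pivot]
--         eq = [v for v in vals if v == pivot]
--         lo = [v for v in vals if v < pivot]
--         if t <= len(hi):
--             vals = hi
--         elif t <= len(hi) + len(eq):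
--             return acc + sum(hi) + pivot * (t - len(hi))
--         else:
--             acc += sum(hi) + sum(eq)
--             t -= len(hi) + len(eq)
--             vals = lo
--
--
-- def solution(contests, k):
--     unimportant = 0
--     important = []
--     for c in contests:
--         if c[1] == 0:
--             unimportant += c[0]
--         else:
--             important.append(c[0])
--     t = min(max(k, 0), len(important))
--     top = topsum(important, t)
--     return unimportant + top - (sum(important) - top)
-- ===== Notes on version B (the rewrite author's own statement) =====
-- stated objective: alternative
-- what changed: B never sorts: it splits off the unimportant sum in one pass, then computes the sum of the t largest important values by a quickselect-style recursion (three-way partition around a middle pivot, recursing only into the side that contains the selection boundary) and returns unimportant + 2*top - total.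
import Mathlib
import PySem

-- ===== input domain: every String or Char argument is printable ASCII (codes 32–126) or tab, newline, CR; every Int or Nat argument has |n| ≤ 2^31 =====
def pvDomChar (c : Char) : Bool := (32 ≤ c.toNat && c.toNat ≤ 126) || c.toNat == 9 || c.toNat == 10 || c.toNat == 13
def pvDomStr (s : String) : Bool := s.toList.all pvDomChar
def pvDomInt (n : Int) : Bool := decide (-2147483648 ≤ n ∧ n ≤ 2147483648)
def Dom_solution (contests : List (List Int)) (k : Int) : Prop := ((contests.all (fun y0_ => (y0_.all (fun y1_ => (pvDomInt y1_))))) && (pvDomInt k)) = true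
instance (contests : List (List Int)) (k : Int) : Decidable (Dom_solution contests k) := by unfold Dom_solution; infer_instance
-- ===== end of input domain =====

-- B never sorts: it splits off the unimportant sum in one pass and computes the sum of the t
-- largest important values by quickselect-style three-way partitioning (objective: alternative).
-- A sorts its argument in place (caller-visible mutation); B does not mutate; the claim is about return values.


-- ===== PORT A =====
def solution (contests : List (List Int)) (k : Int) : Int :=
  let sortedC := PySem.List.sorted contests (fun x => PySem.List.pyGetD x 0 0) false
  let reverseSorted := (PySem.List.slice? sortedC none none (-1)).getD []   -- contests[::-1]
  let r := reverseSorted.foldl (fun (st : Int × Int) c =>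
      if PySem.List.pyGetD c 1 0 = 0 then (st.1 + PySem.List.pyGetD c 0 0, st.2)
      else if st.2 < k then (st.1 + PySem.List.pyGetD c 0 0, st.2 + 1)
      else (st.1 - PySem.List.pyGetD c 0 0, st.2)) (0, 0)
  r.1

-- ===== PORT B =====
-- Source B's topsum: the while-loop becomes the recursion on the shrinking vals with accumulator acc.
def pvHi (pivot : Int) (vals : List Int) : List Int := vals.filter (fun v => pivot < v)
def pvEq (pivot : Int) (vals : List Int) : List Int := vals.filter (fun v => v = pivot)
def pvLo (pivot : Int) (vals : List Int) : List Int := vals.filter (fun v => v < pivot)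
-- pivot = vals[len(vals) // 2]
def pvPivot (vals : List Int) : Int :=
  PySem.List.pyGetD vals (PySem.Int.floordiv (vals.length : Int) 2) 0

theorem pv_filter_lt {p : Int → Bool} {l : List Int} {x : Int} (hx : x ∈ l)
    (hp : p x = false) : (l.filter p).length < l.length := by
  have hs := List.filter_sublist (l := l) (p := p)
  rcases Nat.lt_or_ge (l.filter p).length l.length with h | h
  · exact h
  · exfalso
    have heq := hs.eq_of_length (le_antisymm hs.length_le h)
    rw [← heq] at hx
    have := List.of_mem_filter hx
    rw [hp] at this
    exact Bool.false_ne_true this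

theorem pv_mid_mem (vals : List Int) (h : vals ≠ []) : pvPivot vals ∈ vals := by
  rw [pvPivot]
  have hpos : 0 < vals.length := List.length_pos_iff.mpr h
  apply PySem.List.pyGetD_mem
  have h2 : PySem.Int.floordiv (vals.length : Int) 2 = ((vals.length / 2 : Nat) : Int) := by
    exact_mod_cast PySem.Int.floordiv_natCast vals.length 2
  rw [PySem.Raise.InRange, h2]
  constructor
  · omega
  · exact_mod_cast Nat.div_lt_self hpos (by omega)

theorem pvHi_lt (vals : List Int) (h : vals ≠ []) :
    (pvHi (pvPivot vals) vals).length < vals.length :=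
  pv_filter_lt (pv_mid_mem vals h) (by simp)

theorem pvLo_lt (vals : List Int) (h : vals ≠ []) :
    (pvLo (pvPivot vals) vals).length < vals.length :=
  pv_filter_lt (pv_mid_mem vals h) (by simp)

def pvTopSum (vals : List Int) (t : Int) (acc : Int) : Int :=
  if t = 0 then acc
  else if t = (vals.length : Int) then acc + vals.sum
  else if _hnil : vals = [] then acc   -- unreachable under 0 <= t <= len(vals) (Python would raise IndexError); guard for totality only
  else
    if t ≤ ((pvHi (pvPivot vals) vals).length : Int) then pvTopSum (pvHi (pvPivot vals) vals) t acc
    else if t ≤ ((pvHi (pvPivot vals) vals).length : Int) + ((pvEq (pvPivot vals) vals).length : Int) then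
      acc + (pvHi (pvPivot vals) vals).sum + pvPivot vals * (t - (pvHi (pvPivot vals) vals).length)
    else
      pvTopSum (pvLo (pvPivot vals) vals) (t - (pvHi (pvPivot vals) vals).length - (pvEq (pvPivot vals) vals).length)
        (acc + (pvHi (pvPivot vals) vals).sum + (pvEq (pvPivot vals) vals).sum)
termination_by vals.length
decreasing_by
  · exact pvHi_lt _ _hnil
  · exact pvLo_lt _ _hnil

def solution_alt (contests : List (List Int)) (k : Int) : Int :=
  let p := contests.foldl (fun (st : Int × List Int) c =>
      if PySem.List.pyGetD c 1 0 = 0 then (st.1 + PySem.List.pyGetD c 0 0, st.2)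
      else (st.1, st.2 ++ [PySem.List.pyGetD c 0 0])) (0, [])
  let t : Int := min (max k 0) (p.2.length : Int)
  let top := pvTopSum p.2 t 0
  p.1 + top - (p.2.sum - top)

-- ===== PRECONDITION & SPEC =====
-- Pre_ excludes exactly the inputs where the Python A raises IndexError: a contest with fewer than 2 entries.
def Pre_solution (contests : List (List Int)) (k : Int) : Prop :=
  ∀ c ∈ contests, 2 ≤ c.length
instance (contests : List (List Int)) (k : Int) : Decidable (Pre_solution contests k) := by
  unfold Pre_solution; infer_instance
def pvWitness_solution : List (List Int) × Int := ([[5, 1], [2, 1], [1, 0], [4, 1]], 2)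

def Spec_solution (contests : List (List Int)) (k : Int) (out : Int) : Prop := out = solution_alt contests k
instance (contests : List (List Int)) (k : Int) (out : Int) : Decidable (Spec_solution contests k out) := by unfold Spec_solution; infer_instance

-- ===== CLAIM (what is proved, stated in full; the proofs are below) =====
def Claim_equal_solution : Prop := ∀ (contests : List (List Int)) (k : Int), Dom_solution contests k → Pre_solution contests k → Spec_solution contests k (solution contests k)

-- ===== LEMMAS AND PROOFS =====

-- the point of a contest
def pvPt (c : List Int) : Int := PySem.List.pyGetD c 0 0
-- the important points of a list of contests, in order
def pvImpPts (L : List (List Int))  : List Int :=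
  L.filterMap (fun c => if PySem.List.pyGetD c 1 0 = 0 then none else some (pvPt c))
-- the sum of the unimportant points
def pvUSum (L : List (List Int)) : Int :=
  (L.filterMap (fun c => if PySem.List.pyGetD c 1 0 = 0 then some (pvPt c) else none)).sum
-- A's treatment of the important points: add the first r (if positive), subtract the rest
def pvImpSum : List Int → Int → Int
  | [], _ => 0
  | p :: ps, r => if 0 < r then p + pvImpSum ps (r - 1) else pvImpSum ps r - p
-- the descending sort of a list of Int
def pvD (l : List Int) : List Int := (PySem.List.sorted l (fun x => x) false).reverse

theorem pv_foldA (k : Int) : ∀ (L : List (List Int)) (m j : Int),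
    (L.foldl (fun (st : Int × Int) c =>
      if PySem.List.pyGetD c 1 0 = 0 then (st.1 + PySem.List.pyGetD c 0 0, st.2)
      else if st.2 < k then (st.1 + PySem.List.pyGetD c 0 0, st.2 + 1)
      else (st.1 - PySem.List.pyGetD c 0 0, st.2)) (m, j)).1
    = m + pvUSum L + pvImpSum (pvImpPts L) (k - j) := by
  intro L
  induction L with
  | nil => intro m j; simp [pvUSum, pvImpPts, pvImpSum]
  | cons c L ih =>
    intro m j
    by_cases h : PySem.List.pyGetD c 1 0 = 0
    · simp only [List.foldl_cons, h, if_true, ih, pvUSum, pvImpPts, List.filterMap_cons]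
      simp [pvPt]; ring
    · by_cases hk : j < k
      · simp only [List.foldl_cons, h, if_false, hk, if_true, ih,
          pvUSum, pvImpPts, List.filterMap_cons]
        have h0 : 0 < k - j := by omega
        simp [pvImpSum, pvPt, hk]
        ring_nf
      · simp only [List.foldl_cons, h, if_false, hk, ih,
          pvUSum, pvImpPts, List.filterMap_cons]
        have h0 : ¬ (0 < k - j) := by omega
        simp [pvImpSum, pvPt, hk]
        ring

theorem pv_foldB : ∀ (L : List (List Int)) (m : Int) (acc : List Int),
    L.foldl (fun (st : Int × List Int) c =>
      if PySem.List.pyGetD c 1 0 = 0 then (st.1 + PySem.List.pyGetD c 0 0, st.2)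
      else (st.1, st.2 ++ [PySem.List.pyGetD c 0 0])) (m, acc)
    = (m + pvUSum L, acc ++ pvImpPts L) := by
  intro L
  induction L with
  | nil => intro m acc; simp [pvUSum, pvImpPts]
  | cons c L ih =>
    intro m acc
    by_cases h : PySem.List.pyGetD c 1 0 = 0
    · simp [h, ih, pvUSum, pvImpPts, pvPt]; ring
    · simp [h, ih, pvUSum, pvImpPts, pvPt]

theorem pv_impSum_take_drop : ∀ (ds : List Int) (r : Int),
    pvImpSum ds r =
      (ds.take (min (max r 0) (ds.length : Int)).toNat).sum
      - (ds.drop (min (max r 0) (ds.length : Int)).toNat).sum := by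
  intro ds
  induction ds with
  | nil => intro r; simp [pvImpSum]
  | cons p ps ih =>
    intro r
    by_cases hr : 0 < r
    · have ht : (min (max r 0) ((p :: ps).length : Int)).toNat
          = (min (max (r - 1) 0) ((ps.length : Int))).toNat + 1 := by
        simp only [List.length_cons]; push_cast; omega
      rw [ht]
      simp only [List.take_succ_cons, List.drop_succ_cons, List.sum_cons]
      rw [pvImpSum, if_pos hr, ih (r - 1)]
      ring
    · have ht : (min (max r 0) ((p :: ps).length : Int)).toNat = 0 := by
        simp only [List.length_cons]; push_cast; omega
      have ht' : (min (max r 0) ((ps.length : Int))).toNat = 0 := by omega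
      rw [ht]
      simp only [List.take_zero, List.drop_zero, List.sum_nil, List.sum_cons]
      rw [pvImpSum, if_neg hr, ih r, ht']
      simp; ring

-- the important points extracted from A's descending list equal the descending sort of B's important points
theorem pv_impPts_eq (contests : List (List Int)) :
    pvImpPts ((PySem.List.sorted contests (fun x => PySem.List.pyGetD x 0 0) false).reverse)
    = pvD (pvImpPts contests) := by
  set R := (PySem.List.sorted contests (fun x => PySem.List.pyGetD x 0 0) false).reverse with hR
  set s := PySem.List.sorted (pvImpPts contests) (fun x => x) false with hs
  have hperm : (pvImpPts R).Perm (s.reverse) := by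
    have h1 : R.Perm contests := by
      exact (List.reverse_perm _).trans (PySem.List.sorted_perm ..)
    have h2 : (pvImpPts R).Perm (pvImpPts contests) := List.Perm.filterMap _ h1
    have h3 : (s.reverse).Perm (pvImpPts contests) := by
      exact (List.reverse_perm _).trans (PySem.List.sorted_perm ..)
    exact h2.trans h3.symm
  have hsortR : (pvImpPts R).Pairwise (fun a b : Int => b ≤ a) := by
    have hp : R.Pairwise (fun a b => PySem.List.pyGetD b 0 0 ≤ PySem.List.pyGetD a 0 0) := by
      rw [hR, List.pairwise_reverse]
      exact PySem.List.sorted_pairwise ..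
    refine List.Pairwise.filterMap _ ?_ hp
    intro a a' hle b hb b' hb'
    simp only [ite_eq_iff] at hb hb'
    rcases hb with ⟨_, h⟩ | ⟨_, h⟩ <;> rcases hb' with ⟨_, h'⟩ | ⟨_, h'⟩ <;>
      simp_all [pvPt]
  have hsortS : (s.reverse).Pairwise (fun a b : Int => b ≤ a) := by
    rw [List.pairwise_reverse]
    exact PySem.List.sorted_pairwise ..
  exact hperm.eq_of_pairwise (fun a b _ _ h1 h2 => le_antisymm h2 h1) hsortR hsortS

theorem pv_uSum_eq (contests : List (List Int)) :
    pvUSum ((PySem.List.sorted contests (fun x => PySem.List.pyGetD x 0 0) false).reverse)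
    = pvUSum contests := by
  have h1 : ((PySem.List.sorted contests (fun x => PySem.List.pyGetD x 0 0) false).reverse).Perm contests :=
    (List.reverse_perm _).trans (PySem.List.sorted_perm ..)
  exact (List.Perm.filterMap _ h1).sum_eq

-- basic facts about pvD
theorem pv_D_perm (l : List Int) : (pvD l).Perm l :=
  (List.reverse_perm _).trans (PySem.List.sorted_perm ..)

theorem pv_D_pairwise (l : List Int) : (pvD l).Pairwise (fun a b : Int => b ≤ a) := by
  rw [pvD, List.pairwise_reverse]
  exact PySem.List.sorted_pairwise ..

theorem pv_D_eq_of (l ys : List Int) (hp : ys.Perm l)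
    (hs : ys.Pairwise (fun a b : Int => b ≤ a)) : pvD l = ys :=
  ((pv_D_perm l).trans hp.symm).eq_of_pairwise
    (fun a b _ _ h1 h2 => le_antisymm h2 h1) (pv_D_pairwise l) hs

theorem pv_D_length (l : List Int) : (pvD l).length = l.length := (pv_D_perm l).length_eq
theorem pv_D_sum (l : List Int) : (pvD l).sum = l.sum := (pv_D_perm l).sum_eq

-- three-way partition: perm
theorem pv_partition_perm (l : List Int) (pivot : Int) :
    (pvHi pivot l ++ (pvEq pivot l ++ pvLo pivot l)).Perm l := by
  rw [pvHi, pvEq, pvLo]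
  have h1 : (l.filter (fun v => pivot < v) ++ l.filter (fun v => !(decide (pivot < v)))).Perm l :=
    List.filter_append_perm _ l
  have h2 : ((l.filter (fun v => !(decide (pivot < v)))).filter (fun v => v = pivot)
      ++ (l.filter (fun v => !(decide (pivot < v)))).filter (fun v => !(decide (v = pivot)))).Perm
      (l.filter (fun v => !(decide (pivot < v)))) :=
    List.filter_append_perm _ _
  have he : (l.filter (fun v => !(decide (pivot < v)))).filter (fun v => v = pivot)
      = l.filter (fun v => v = pivot) := by
    rw [List.filter_filter]
    apply List.filter_congr
    intro x _
    by_cases h : x = pivot <;> simp [h]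
  have hl : (l.filter (fun v => !(decide (pivot < v)))).filter (fun v => !(decide (v = pivot)))
      = l.filter (fun v => v < pivot) := by
    rw [List.filter_filter]
    apply List.filter_congr
    intro x _
    rcases lt_trichotomy x pivot with h | h | h <;> simp [h] <;> omega
  rw [he, hl] at h2
  exact (List.Perm.append_left _ h2).trans h1

-- all-equal lists are pairwise in the descending order
theorem pv_pairwise_of_all_eq (l : List Int) (a : Int) (h : ∀ b ∈ l, b = a) :
    l.Pairwise (fun x y : Int => y ≤ x) := by
  induction l with
  | nil => simp
  | cons x xs ih =>
    rw [List.pairwise_cons]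
    refine ⟨fun y hy => ?_, ih (fun b hb => h b (List.mem_cons_of_mem _ hb))⟩
    rw [h x (List.mem_cons_self ..), h y (List.mem_cons_of_mem _ hy)]

theorem pv_mem_Hi {l : List Int} {pivot a : Int} (ha : a ∈ pvD (pvHi pivot l)) : pivot < a := by
  have := (pv_D_perm _).mem_iff.mp ha
  rw [pvHi] at this
  simpa using (List.mem_filter.mp this).2

theorem pv_mem_Eq {l : List Int} {pivot a : Int} (ha : a ∈ pvEq pivot l) : a = pivot := by
  rw [pvEq] at ha
  simpa using (List.mem_filter.mp ha).2

theorem pv_mem_Lo {l : List Int} {pivot a : Int} (ha : a ∈ pvD (pvLo pivot l)) : a < pivot := by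
  have := (pv_D_perm _).mem_iff.mp ha
  rw [pvLo] at this
  simpa using (List.mem_filter.mp this).2

-- three-way partition: the descending sort splits
theorem pv_D_split (l : List Int) (pivot : Int) :
    pvD l = pvD (pvHi pivot l) ++ (pvEq pivot l ++ pvD (pvLo pivot l)) := by
  apply pv_D_eq_of
  · have := pv_partition_perm l pivot
    refine List.Perm.trans ?_ this
    exact ((pv_D_perm _).append ((List.Perm.refl _).append (pv_D_perm _)))
  · rw [List.pairwise_append]
    refine ⟨pv_D_pairwise _, ?_, ?_⟩
    · rw [List.pairwise_append]
      refine ⟨pv_pairwise_of_all_eq _ pivot (fun b hb => pv_mem_Eq hb), pv_D_pairwise _, ?_⟩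
      intro a ha b hb
      have ha' : a = pivot := pv_mem_Eq ha
      have hb' : b < pivot := pv_mem_Lo hb
      omega
    · intro a ha b hb
      have ha' : pivot < a := pv_mem_Hi ha
      rcases List.mem_append.mp hb with hb | hb
      · have := pv_mem_Eq hb; omega
      · have := pv_mem_Lo hb; omega

-- the partition pieces account for the whole length
theorem pv_partition_length (l : List Int) (pivot : Int) :
    (pvHi pivot l).length + ((pvEq pivot l).length + (pvLo pivot l).length) = l.length := by
  have := (pv_partition_perm l pivot).length_eq
  simpa using this

-- main: pvTopSum computes the sum of the t largest
theorem pv_topSum_eq : ∀ (n : Nat) (vals : List Int), vals.length = n →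
    ∀ (t acc : Int), 0 ≤ t → t ≤ (vals.length : Int) →
    pvTopSum vals t acc = acc + ((pvD vals).take t.toNat).sum := by
  intro n
  induction n using Nat.strong_induction_on with
  | _ n ih =>
    intro vals hn t acc h0 hle
    rw [pvTopSum]
    by_cases ht0 : t = 0
    · simp [ht0]
    rw [if_neg ht0]
    by_cases htl : t = (vals.length : Int)
    · rw [if_pos htl]
      have hT : t.toNat = (pvD vals).length := by rw [pv_D_length]; omega
      rw [hT, List.take_length, pv_D_sum]
    rw [if_neg htl]
    have hnil : vals ≠ [] := by
      intro h
      subst h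
      simp at hle
      omega
    rw [dif_neg hnil]
    set pivot := pvPivot vals with hpiv
    have hpart := pv_partition_length vals pivot
    have hDhiLen : (pvD (pvHi pivot vals)).length = (pvHi pivot vals).length := pv_D_length _
    have hEqRep : pvEq pivot vals = List.replicate (pvEq pivot vals).length pivot :=
      List.eq_replicate_of_mem (fun b hb => pv_mem_Eq hb)
    rw [pv_D_split vals pivot, List.take_append, List.sum_append]
    by_cases hA : t ≤ ((pvHi pivot vals).length : Int)
    · rw [if_pos hA]
      have hm : t.toNat - (pvD (pvHi pivot vals)).length = 0 := by
        rw [hDhiLen]; omega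
      rw [hm, List.take_zero, List.sum_nil, add_zero]
      exact ih (pvHi pivot vals).length (by rw [← hn]; exact pvHi_lt vals hnil)
        (pvHi pivot vals) rfl t acc h0 hA
    rw [if_neg hA]
    have hhi : ((pvHi pivot vals).length : Int) < t := by omega
    have hDhiTake : (pvD (pvHi pivot vals)).take t.toNat = pvD (pvHi pivot vals) :=
      List.take_of_length_le (by omega)
    rw [hDhiTake, List.take_append, List.sum_append, pv_D_sum]
    by_cases hB : t ≤ ((pvHi pivot vals).length : Int) + ((pvEq pivot vals).length : Int)
    · rw [if_pos hB]
      have hm0 : t.toNat - (pvD (pvHi pivot vals)).length - (pvEq pivot vals).length = 0 := by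
        rw [hDhiLen]; omega
      rw [hm0, List.take_zero, List.sum_nil, add_zero]
      have hsumtake : ((pvEq pivot vals).take (t.toNat - (pvD (pvHi pivot vals)).length)).sum
          = ((t.toNat - (pvD (pvHi pivot vals)).length : Nat) : Int) * pivot := by
        conv_lhs => rw [hEqRep]
        rw [List.take_replicate, List.sum_replicate, nsmul_eq_mul]
        congr 1
        push_cast
        omega
      rw [hsumtake]
      have hc : ((t.toNat - (pvD (pvHi pivot vals)).length : Nat) : Int)
          = t - ((pvHi pivot vals).length : Int) := by
        rw [hDhiLen]
        omega
      rw [hc]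
      ring
    · rw [if_neg hB]
      have hm1 : (pvEq pivot vals).take (t.toNat - (pvD (pvHi pivot vals)).length)
          = pvEq pivot vals :=
        List.take_of_length_le (by rw [hDhiLen]; omega)
      rw [hm1]
      have hrec := ih (pvLo pivot vals).length (by rw [← hn]; exact pvLo_lt vals hnil)
        (pvLo pivot vals) rfl (t - (pvHi pivot vals).length - (pvEq pivot vals).length)
        (acc + (pvHi pivot vals).sum + (pvEq pivot vals).sum) (by omega) (by omega)
      rw [hrec]
      have hcast : (t - ((pvHi pivot vals).length : Int) - ((pvEq pivot vals).length : Int)).toNat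
          = t.toNat - (pvD (pvHi pivot vals)).length - (pvEq pivot vals).length := by
        rw [hDhiLen]; omega
      rw [hcast]
      ring

-- ===== VERDICT (by name: the statement is the Claim_ definition above) =====
theorem solution_spec : Claim_equal_solution := by
  intro contests k _ _
  unfold Spec_solution
  simp only [solution, solution_alt, PySem.List.slice?_none_none_neg_one, Option.getD_some,
    pv_foldA, pv_foldB]
  simp only [List.nil_append, zero_add, Int.sub_zero]
  rw [pv_uSum_eq, pv_impPts_eq, pv_impSum_take_drop, pv_D_length]
  set imp := pvImpPts contests with himp
  set t : Int := min (max k 0) (imp.length : Int) with ht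
  have h0 : 0 ≤ t := by rw [ht]; positivity
  have hts : t ≤ (imp.length : Int) := by rw [ht]; exact min_le_right _ _
  rw [pv_topSum_eq imp.length imp rfl t 0 h0 hts, zero_add]
  have hsplit : ((pvD imp).take t.toNat).sum + ((pvD imp).drop t.toNat).sum = imp.sum := by
    rw [← List.sum_append, List.take_append_drop, pv_D_sum]
  omega
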